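-- pv_equiv track=rewrite | github.com/rhelmstedter/advent-of-code | 2022/1/puzzle.py | part1
-- ===== SOURCE A (Python) =====
-- def part1(lines):
--     """elf with the most calories"""
--     elves = []
--     current_elf = 0
--     for line in lines:
--         if line:
--             current_elf += int(line)
--         else:
--             elves.append(current_elf)
--             current_elf = 0
--     return sorted(elves)
-- ===== SOURCE B (Python) =====
-- def part1(lines):
--     """elf with the most calories"""
--     nums = [int(line) if line else None for line in lines]
--     totals = []
--     while True:
--         try:
--             k = nums.index(None)
--         except ValueError:
--             break
--         totals.append(sum(nums[:k]))
--         nums = nums[k + 1:]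
--     return sorted(totals)
-- ===== Notes on version B (the rewrite author's own statement) =====
-- stated objective: alternative
-- what changed: A keeps one running sum while scanning the lines; B first parses every line into a list of ints with None marking blank separators, then consumes that list group by group via list.index(None) and slice sums.
import Mathlib
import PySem

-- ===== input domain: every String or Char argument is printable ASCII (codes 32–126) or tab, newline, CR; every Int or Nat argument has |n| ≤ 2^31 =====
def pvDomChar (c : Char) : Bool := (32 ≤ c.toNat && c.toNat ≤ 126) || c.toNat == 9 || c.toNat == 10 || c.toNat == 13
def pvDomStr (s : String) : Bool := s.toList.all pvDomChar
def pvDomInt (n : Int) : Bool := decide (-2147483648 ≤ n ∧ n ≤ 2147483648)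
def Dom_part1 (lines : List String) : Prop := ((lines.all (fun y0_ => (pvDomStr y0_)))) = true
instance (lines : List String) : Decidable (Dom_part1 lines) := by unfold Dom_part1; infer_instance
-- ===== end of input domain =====

-- B first parses every line (None marking the blank separators), then reads the parsed list
-- group by group (find next None with index, sum the slice before it) instead of A's single
-- running-sum accumulator loop; alternative decomposition, same cost.

-- ===== PORT A =====
-- the for loop, as structural recursion over (elves, current_elf)
def part1Loop (elves : List Int) (cur : Int) : List String → List Int × Int
  | [] => (elves, cur)
  | l :: ls =>
    if l ≠ "" then part1Loop elves (cur + (PySem.Int.ofStr? l).getD 0) ls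
    else part1Loop (elves ++ [cur]) 0 ls

def part1 (lines : List String) : List Int :=
  PySem.List.sorted (part1Loop [] 0 lines).1 (fun x => x) false

-- ===== PORT B =====
-- the while loop: find the next None with index, sum the slice before it, continue after it.
-- sum(nums[:k]) sums Python ints; before the first None the slice holds only actual ints,
-- so summing each element's .getD 0 is exact there.
def part1AltLoop (totals : List Int) (nums : List (Option Int)) : List Int :=
  match h : PySem.List.index? nums none with
  | none => totals
  | some k =>
    part1AltLoop
      (totals ++ [((PySem.List.slice nums none (some (k : Int))).map (fun v => v.getD 0)).sum])
      (PySem.List.slice nums (some ((k : Int) + 1)) none)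
termination_by nums.length
decreasing_by
  obtain ⟨hk, -, -⟩ := PySem.List.getElem_of_index?_eq_some h
  have : PySem.List.slice nums (some ((k : Int) + 1)) none = nums.drop (k + 1) := by
    have := PySem.List.slice_from_natCast nums (k + 1)
    simpa using this
  simp [this]
  omega

-- int(line) if line else None
def part1Parse (line : String) : Option Int :=
  if line ≠ "" then some ((PySem.Int.ofStr? line).getD 0) else none

def part1_alt (lines : List String) : List Int :=
  PySem.List.sorted (part1AltLoop [] (lines.map part1Parse)) (fun x => x) false

-- ===== PRECONDITION & SPEC =====
-- Python A raises ValueError on any non-empty line int() cannot parse; Pre_ excludes exactly those.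
def Pre_part1 (lines : List String) : Prop :=
  ∀ l ∈ lines, l ≠ "" → (PySem.Int.ofStr? l).isSome
instance (lines : List String) : Decidable (Pre_part1 lines) := by unfold Pre_part1; infer_instance
def pvWitness_part1 : List String := ["100", "200", "", "300", ""]

def Spec_part1 (lines : List String) (out : List Int) : Prop := out = part1_alt lines
instance (lines : List String) (out : List Int) : Decidable (Spec_part1 lines out) := by unfold Spec_part1; infer_instance

-- ===== CLAIM (what is proved, stated in full; the proofs are below) =====
def Claim_equal_part1 : Prop := ∀ (lines : List String), Dom_part1 lines → Pre_part1 lines → Spec_part1 lines (part1 lines)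

-- ===== LEMMAS AND PROOFS =====

theorem part1Parse_getD (l : String) :
    (part1Parse l).getD 0 = (PySem.Int.ofStr? l).getD 0 := by
  unfold part1Parse
  split_ifs with h
  · rfl
  · simp at h
    subst h
    decide

theorem part1Parse_eq_none_iff (l : String) : part1Parse l = none ↔ l = "" := by
  unfold part1Parse
  split_ifs with h <;> simp_all

-- A's loop over a separator-free prefix just accumulates the sum of its ints
theorem part1Loop_append_nosep (pre : List String) (rest : List String)
    (elves : List Int) (cur : Int) (hpre : ∀ l ∈ pre, l ≠ "") :
    part1Loop elves cur (pre ++ rest)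
      = part1Loop elves (cur + (pre.map (fun l => (PySem.Int.ofStr? l).getD 0)).sum) rest := by
  induction pre generalizing cur with
  | nil => simp
  | cons l ls ih =>
    have hl : l ≠ "" := hpre l (by simp)
    simp only [List.cons_append, part1Loop, if_pos hl, List.map_cons, List.sum_cons]
    rw [ih _ (fun x hx => hpre x (by simp [hx]))]
    ring_nf

theorem part1Loop_eq_altLoop (n : Nat) :
    ∀ (lines : List String), lines.length ≤ n → ∀ (totals : List Int),
      (part1Loop totals 0 lines).1 = part1AltLoop totals (lines.map part1Parse) := by
  induction n with
  | zero =>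
    intro lines hlen totals
    have : lines = [] := List.eq_nil_of_length_eq_zero (Nat.le_zero.mp hlen)
    subst this
    rw [part1AltLoop]
    simp [part1Loop, PySem.List.index?_eq_idxOf?]
  | succ n ih =>
    intro lines hlen totals
    rcases h : PySem.List.index? lines "" with _ | k
    · -- no separator: the whole list is one unterminated group, dropped by both
      have hnm : "" ∉ lines := (PySem.List.index?_eq_none_iff _ _).mp h
      have hidx : PySem.List.index? (lines.map part1Parse) (none : Option Int) = none := by
        apply (PySem.List.index?_eq_none_iff _ _).mpr
        simp only [List.mem_map, not_exists]
        rintro l ⟨hl, hp⟩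
        exact hnm ((part1Parse_eq_none_iff l).mp hp ▸ hl)
      have := part1Loop_append_nosep lines [] totals 0
        (fun l hl => fun he => hnm (he ▸ hl))
      rw [part1AltLoop, hidx]
      simpa [part1Loop] using congrArg Prod.fst this
    · obtain ⟨pre, suf, hdec, hlenp, hnm⟩ := (PySem.List.index?_eq_some_iff _ _ _).mp h
      have hpre : ∀ l ∈ pre, l ≠ "" := fun l hl he => hnm (he ▸ hl)
      have hmap : lines.map part1Parse = pre.map part1Parse ++ none :: suf.map part1Parse := by
        rw [hdec]
        simp [part1Parse]
      have hidx : PySem.List.index? (lines.map part1Parse) (none : Option Int) = some k := by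
        apply (PySem.List.index?_eq_some_iff _ _ _).mpr
        refine ⟨pre.map part1Parse, suf.map part1Parse, hmap, by simp [hlenp], ?_⟩
        simp only [List.mem_map, not_exists]
        rintro l ⟨hl, hp⟩
        exact hpre l hl ((part1Parse_eq_none_iff l).mp hp)
      have hslice1 : PySem.List.slice (lines.map part1Parse) none (some (k : Int))
          = pre.map part1Parse := by
        rw [PySem.List.slice_to_natCast, hmap, ← hlenp]
        simp
      have hslice2 : PySem.List.slice (lines.map part1Parse) (some ((k : Int) + 1)) none
          = suf.map part1Parse := by
        have := PySem.List.slice_from_natCast (lines.map part1Parse) (k + 1)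
        rw [show ((k : Int) + 1) = ((k + 1 : Nat) : Int) by push_cast; ring, this,
          hmap, ← hlenp,
          show pre.length + 1 = (pre.map part1Parse).length + 1 by simp, List.drop_append]
        simp
      have hsum : ((pre.map part1Parse).map (fun v => v.getD 0)).sum
          = (pre.map (fun l => (PySem.Int.ofStr? l).getD 0)).sum := by
        rw [List.map_map]
        exact congrArg List.sum (List.map_congr_left (fun l _ => part1Parse_getD l))
      have hsuf : suf.length ≤ n := by
        have : lines.length = pre.length + suf.length + 1 := by simp [hdec]; omega
        omega
      rw [part1AltLoop, hidx]
      simp only [hslice1, hslice2, hsum]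
      rw [hdec, part1Loop_append_nosep pre _ totals 0 hpre]
      rw [zero_add]
      show (part1Loop (totals ++ [_]) 0 suf).1 = _
      exact ih suf hsuf _

theorem part1_eq_alt (lines : List String) : part1 lines = part1_alt lines := by
  unfold part1 part1_alt
  rw [part1Loop_eq_altLoop lines.length lines le_rfl]

-- ===== VERDICT (by name: the statement is the Claim_ definition above) =====
theorem part1_spec : Claim_equal_part1 := by
  intro lines _ _
  unfold Spec_part1
  exact part1_eq_alt lines
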